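/- PORTED by tools/port_fixed.py from Prog/Jsmn/D/PrimCall.lean to THE FIXED IMAGE fixed/jsmn_d.bin (same bytes at the same addresses; binFD). Do not edit: edit the original and port again. -/
/-
  jsmn_d.bin: `jsmn_parse_primitive`, third part: the two call sites.
    prim_token   1000DEH (found, with a token array) → call jsmn_alloc_token → prim_nomem | prim_fill          (6 instructions + the callee)
    prim_fill    1000F1H (a token was allocated)     → call jsmn_fill_token → prim_dec                          (7 instructions + the callee)
  The callees are used through their contracts (`AllocSpec`, `FillSpec`).
-/
import Prog.Jsmn.Fixed.Specs
import Prog.Jsmn.Fixed.CodeFD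
import Prog.Jsmn.Fixed.D.PrimExit
namespace X86
namespace J6
namespace FD
open X86.User (CodeAt RegsKept Span FlagsOK Layout toNat_add_ofNat toNat_ofNat_lt' add_ofNat_add)
open Jsmn JsmnFDBytes

set_option maxRecDepth 100000
set_option maxHeartbeats 4000000
set_option linter.unusedSimpArgs false
set_option linter.unusedVariables false

variable {n : User.Layout} {v0 : User.State} {ret pa jsA tb : Word} {js : List UInt8} {numTokens : Nat} {p pc : Parser} {toks tc : Option Tokens}

/-- A caller's data region is a data region of its callee (whose stack lies below the caller's window). -/
theorem region_callee {b : Bin} {v1 : User.State} {use : Nat} {a : Word} {len : Nat} (h : Region b n v0 use a len)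
    (h1 : (v1.reg .rsp).toNat + 8 ≤ (v0.reg .rsp).toNat) (h2 : (v0.reg .rsp).toNat - use ≤ (v1.reg .rsp).toNat) : Region b n v1 0 a len :=
  ⟨h.lo, h.hi, h.img, by have := h.stk; omega⟩

theorem u32_i32 (x : Nat) (h : x < 2 ^ 32) : u32 (i32 x) = x := by unfold u32 i32; omega

set_option hygiene false in
/-- `PrimFrame` at the view `v1` a callee returned to (with `v3_open hf hpost1`, `hk := hpost1.kept` and the callee's footprint `hpost1_same`
normalised in the context): everything but the `parser` and `toksArg` fields. -/
macro "prim_frame_call_f" : tactic => `(tactic|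
  refine ⟨by rw [hk.get .rbx rfl]; v3_regnorm; exact hf_rbx, by rw [hk.get .rbp rfl]; v3_regnorm; exact hf_rbp, hpost1_rsp,
    by rw [hk.get .r12 rfl]; v3_regnorm; exact hf_r12, by rw [hk.get .r13 rfl]; v3_regnorm; exact hf_r13,
    by rw [hk.get .r14 rfl]; v3_regnorm; exact hf_r14, by rw [hk.get .r15 rfl]; v3_regnorm; exact hf_r15,
    by v3_frame hf_slotRbp, by v3_frame hf_slotRbx, by v3_frame hf_retA, by v3_frame hf_img, ?_, ?_, rfl,
    by simp only [toksBytes, tokSize_default]; v3_same⟩)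

/-- A token was allocated (`rax = &tokens[i]`): `jsmn_fill_token(token, JSMN_PRIMITIVE, start, parser->pos); parser->pos--; return 0`. -/
theorem prim_fill (hfill : FillSpec binFD n) {ts ts1 : Tokens} {p1 : Parser} {i : Nat}
    (hp : ScanPre binFD n binFD.prim binFD.usePrim v0 ret pa jsA tb js numTokens p (some ts)) {v : User.State}
    (hrip : v.rip = 0x1000f1) (hf : PrimFrame v0 ret pa tb numTokens p (some ts) p1 (some ts1) v)
    (hrax : v.reg .rax = tokAddr Config.default tb i) (hi : i < numTokens) :
    Reach n v (ScanPost binFD binFD.usePrim v0 ret pa tb numTokens (some ts) 0 { p1 with pos := u32 ((p1.pos : Int) - 1) }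
      (some (ts1.set i (fillToken (ts1.getD i default) JSMN_PRIMITIVE (i32 p.pos) (i32 p1.pos))))) := by
  have hR := hp.toksRegion
  v3_open hp hf hR
  j6f_bin
  obtain ⟨htb0, hlen1, hts1⟩ := hf_toksArg
  simp only [toksBytes, tokSize_default] at *
  have hcode := JsmnFD.tjfd_jsmn_parse_primitive_code hf_img
  have hplt : p.pos < 2 ^ 32 := hp_parser_pos ▸ User.Mem.readLE4_lt _ _
  have hqlt : p1.pos < 2 ^ 32 := hf_parser_pos ▸ User.Mem.readLE4_lt _ _
  have htbn : tb.toNat ≠ 0 := fun h => htb0 (UInt64.toNat_inj.mp h)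
  have haddr : tokAddr Config.default tb i = tb + UInt64.ofNat (16 * i) := by unfold tokAddr; rw [tokSize_default]
  rw [haddr] at hrax
  have hsz : Config.default.tokSize * ts1.length = 16 * numTokens := by rw [tokSize_default, hlen1]
  v3_walk hcode hp.call.fetch []
  refine Reach.trans (hfill _ 0x100107 tb ts1 i JSMN_PRIMITIVE (i32 p.pos) (i32 p1.pos)
    ⟨show CallPre n 0x100000 image_bytes 0x100076 0 0x100107 _ by v3_callpre hf_img hp.call, by v3_regnorm; exact haddr.symm, by v3_regnorm; rfl,
      by v3_regnorm; rw [u32_i32 _ hplt, Word.low32_ofNat_of_lt hplt, Word.low32_ofNat_of_lt hplt],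
      by v3_regnorm; rw [u32_i32 _ hqlt, Word.low32_ofNat_of_lt hqlt, Word.low32_ofNat_of_lt hqlt], by decide, i32_range _, i32_range _,
      by rw [hlen1]; exact hi, by show TokensAt Config.default _ _ _; v3_frame hts1,
      by rw [hlen1]; exact region_callee hp.toksRegion (by v3_regnorm; v3_omega) (by v3_regnorm; v3_omega)⟩) ?_
  intro v2 hpost
  obtain ⟨hpost1, htoks2⟩ := hpost
  v3_open hpost1
  have hk := hpost1.kept
  v3_viewnorm at hpost1_rsp hpost1_same hpost1_rip
  have hsp : (v0.reg .rsp - 24).toNat = (v0.reg .rsp).toNat - 24 := by v3_omega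
  rw [binFD_cfg, hsz, hsp] at hpost1_same
  refine prim_dec hp hpost1_rip ?_
  prim_frame_call_f
  · v3_frame hf.parser
  · exact ⟨htb0, by rw [List.length_set]; exact hlen1, htoks2⟩

/-- `found` with a token array: `jsmn_alloc_token(parser, tokens, num_tokens)`, then what the model's `allocToken` says: no room (NOMEM,
`pos` restored), or the token filled as a primitive `[start, q)` and `pos = q - 1`. -/
theorem prim_token (halloc : AllocSpec binFD n) (hfill : FillSpec binFD n) {ts : Tokens}
    (hp : ScanPre binFD n binFD.prim binFD.usePrim v0 ret pa jsA tb js numTokens p (some ts)) {q : Nat} {v : User.State}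
    (hrip : v.rip = 0x1000de) (hf : PrimFrame v0 ret pa tb numTokens p (some ts) { p with pos := q } (some ts) v)
    (hr : PrimRegs jsA tb js numTokens v) :
    Reach n v (fun v' => match allocToken Config.default { p with pos := q } ts numTokens with
      | none => ScanPost binFD binFD.usePrim v0 ret pa tb numTokens (some ts) JSMN_ERROR_NOMEM p (some ts) v'
      | some (i, p1, ts1) => ScanPost binFD binFD.usePrim v0 ret pa tb numTokens (some ts) 0 { p1 with pos := u32 ((q : Int) - 1) }
          (some (ts1.set i (fillToken (ts1.getD i default) JSMN_PRIMITIVE (i32 p.pos) (i32 q)))) v') := by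
  have hR := hp.toksRegion
  v3_open hp hf hr hR
  j6f_bin
  obtain ⟨htb0, hlen, hts⟩ := hf_toksArg
  simp only [toksBytes, tokSize_default] at *
  have hcode := JsmnFD.tjfd_jsmn_parse_primitive_code hf_img
  have htbn : tb.toNat ≠ 0 := fun h => htb0 (UInt64.toNat_inj.mp h)
  have hsz : Config.default.tokSize * ts.length = 16 * numTokens := by rw [tokSize_default, hlen]
  v3_walk hcode hp.call.fetch []
  refine Reach.trans (halloc _ 0x1000f1 pa tb numTokens { p with pos := q } ts
    ⟨show CallPre n 0x100000 image_bytes 0x100040 0 0x1000f1 _ by v3_callpre hf_img hp.call, by v3_regnorm, by v3_regnorm, by v3_regnorm, hp.nlt,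
      by v3_frame hf.parser, by show TokensAt Config.default _ _ _; v3_frame hts, hlen,
      region_callee hp.env.parserR (by v3_regnorm; v3_omega) (by v3_regnorm; v3_omega),
      region_callee hp.toksRegion (by v3_regnorm; v3_omega) (by v3_regnorm; v3_omega), hp.env.parserToks⟩) ?_
  intro v1 hpost
  obtain ⟨hpost1, hres⟩ := hpost
  v3_open hpost1
  have hk := hpost1.kept
  v3_viewnorm at hpost1_rsp hpost1_same hpost1_rip
  have hsp : (v0.reg .rsp - 24).toNat = (v0.reg .rsp).toNat - 24 := by v3_omega
  unfold dataWins at hpost1_same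
  rw [binFD_cfg, tokSize_default, hsp] at hpost1_same
  rw [binFD_cfg] at hres
  by_cases hge : p.toknext ≥ numTokens
  · -- no room: rax = NULL, memory as before the call
    simp only [allocToken, hge, if_true] at hres ⊢
    obtain ⟨hrax1, hmem1⟩ := hres
    v3_viewnorm at hmem1
    refine prim_nomem (q := q) hp hpost1_rip ?_ hrax1
    prim_frame_call_f
    · rw [hmem1]; v3_frame hf.parser
    · exact ⟨htb0, hlen, by rw [hmem1]; v3_frame hts⟩
  · -- tokens[toknext] allocated
    simp only [allocToken, hge, if_false] at hres ⊢
    refine prim_fill (p1 := ⟨q, u32 ((p.toknext : Int) + 1), p.toksuper⟩) (i := p.toknext) hfill hp hpost1_rip ?_ hres.1 (by omega)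
    prim_frame_call_f
    · exact hres.2.1
    · exact ⟨htb0, by rw [List.length_set]; exact hlen, hres.2.2⟩

end FD
end J6
end X86
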